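-- pv_equiv track=rewrite | github.com/tapo-o/aois- | lab2/minimizer/method.py | get_prime_implicants_with_steps
-- ===== SOURCE A (Python) =====
-- from typing import Tuple, Set, List
--
-- def diff_by_one(term1: Tuple[int, ...], term2: Tuple[int, ...]) -> Tuple[Tuple[int, ...], bool]:
--     diff_count = sum(1 for a, b in zip(term1, term2) if a != b)
--     if diff_count == 1:
--         # Сохраняем значения, которые совпали, и ставим -1 (прочерк) там, где различие
--         return tuple(a if a == b else -1 for a, b in zip(term1, term2)), True
--     return tuple(), False
--
-- def format_term(term: Tuple[int, ...]) -> str: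
--     return "".join(str(x) if x != -1 else "-" for x in term)
--
-- def get_prime_implicants_with_steps(terms: Tuple[Tuple[int, ...], ...]) -> Tuple[Tuple[Tuple[int, ...], ...], List[str]]:
--     steps_log = []
--     current_terms = set(terms)
--     all_prime_implicants = set()
--     stage = 1
--
--     while current_terms:
--         next_terms = set()
--         used_in_gluing = set()
--         stage_log = [f"Стадия {stage}:"]
--
--         term_list = sorted(list(current_terms))
--         for i in range(len(term_list)):
--             for j in range(i + 1, len(term_list)):
--                 glued, success = diff_by_one(term_list[i], term_list[j])
--                 if success:
--                     next_terms.add(glued)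
--                     used_in_gluing.add(term_list[i])
--                     used_in_gluing.add(term_list[j])
--                     stage_log.append(f"  {format_term(term_list[i])} + {format_term(term_list[j])} -> {format_term(glued)}")
--
--         unmerged = current_terms - used_in_gluing
--         all_prime_implicants.update(unmerged)
--
--         if not next_terms:
--             if stage == 1 and not next_terms:
--                 steps_log.append("  Склеивание невозможно.")
--             else:
--                 steps_log.extend(stage_log)
--                 steps_log.append("  Процесс склеивания завершен.")
--             break
--
--         steps_log.extend(stage_log)
--         steps_log.append("")
--         current_terms = next_terms
--         stage += 1
--
--     return tuple(sorted(list(all_prime_implicants))), steps_log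
-- ===== SOURCE B (Python) =====
-- def _glue_pairs(pairs):
--     # glued tuple if exactly one zipped position differs, else None (recursive on the pair list)
--     if not pairs:
--         return None
--     (x, y), rest = pairs[0], pairs[1:]
--     if x == y:
--         g = _glue_pairs(rest)
--         return None if g is None else (x,) + g
--     if all(u == v for u, v in rest):
--         return (-1,) + tuple(u for u, _ in rest)
--     return None
--
--
-- def _glue(a, b):
--     return _glue_pairs(list(zip(a, b)))
--
--
-- def _fmt(t):
--     return "".join("-" if x == -1 else str(x) for x in t)
--
--
-- def get_prime_implicants_with_steps(terms):
--     log = []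
--     current = sorted(set(terms))
--     primes = set()
--     stage = 1
--     while current:
--         matches = []
--         rest = current
--         while rest:
--             a, rest = rest[0], rest[1:]
--             for b in rest:
--                 g = _glue(a, b)
--                 if g is not None:
--                     matches.append((a, b, g))
--         used = {t for a, b, _ in matches for t in (a, b)}
--         primes |= {t for t in current if t not in used}
--         lines = ["  %s + %s -> %s" % (_fmt(a), _fmt(b), _fmt(g)) for a, b, g in matches]
--         if not matches:
--             if stage == 1:
--                 log.append("  Склеивание невозможно.")
--             else:
--                 log += ["Стадия %d:" % stage, "  Процесс склеивания завершен."]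
--             break
--         log += ["Стадия %d:" % stage] + lines + [""]
--         current = sorted({g for _, _, g in matches})
--         stage += 1
--     return tuple(sorted(primes)), log
-- ===== Notes on version B (the rewrite author's own statement) =====
-- stated objective: alternative
-- what changed: Per stage the imperative nested index loops mutating three sets are replaced by a tails-recursive pair scan producing one explicit match list from which the log lines, the used set, the survivors and the next generation are each derived in a separate pure pass; the glue test itself is a recursive first-difference split (match the common prefix, then require the rest equal) instead of count-differences-then-rebuild, and the per-stage state is a sorted list rather than a set that is re-sorted from scratch.
import Mathlib
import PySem

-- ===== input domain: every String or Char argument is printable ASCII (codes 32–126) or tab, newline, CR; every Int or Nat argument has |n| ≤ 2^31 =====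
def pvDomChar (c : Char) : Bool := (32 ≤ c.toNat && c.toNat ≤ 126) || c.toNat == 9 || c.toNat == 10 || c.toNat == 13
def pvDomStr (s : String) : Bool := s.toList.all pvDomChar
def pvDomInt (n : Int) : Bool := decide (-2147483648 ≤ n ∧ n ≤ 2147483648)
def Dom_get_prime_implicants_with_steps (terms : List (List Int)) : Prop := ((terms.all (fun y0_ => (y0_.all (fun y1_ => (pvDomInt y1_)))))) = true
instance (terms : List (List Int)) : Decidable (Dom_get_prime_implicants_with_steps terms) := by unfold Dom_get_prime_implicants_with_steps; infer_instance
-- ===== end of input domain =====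

-- B replaces A's per-stage nested index loops mutating three sets by a tails-recursive pair
-- scan producing one match list from which log, used set and next stage are derived in
-- separate pure passes (and a recursive first-difference glue test); same cost, alternative structure.


-- Python's sorted() on tuples of ints: lexicographic order on List Int (Mathlib's list linear
-- order coincides with Python tuple comparison); instance given explicitly so order lemmas apply.
def pvSortT (xs : List (List Int)) : List (List Int) :=
  @PySem.List.sorted _ _ List.instLinearOrder.toLT LinearOrder.toDecidableLT xs (fun x => x) false

-- stage-count fuel for the while loop (totality device only; large enough, see loop comments)
def pvFuelA (terms : List (List Int)) : Nat :=
  let L := (terms.map List.length).foldl max 0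
  (L + 1) * (L + 1) + 2

-- ===== PORT A =====

def pvDiffByOne (t1 t2 : List Int) : List Int × Bool :=
  let z := t1.zip t2
  -- sum(1 for a, b in zip(term1, term2) if a != b): the 0/1-generator sum is the count (exact)
  let diffCount : Int := (z.countP (fun p => p.1 != p.2) : Int)
  if diffCount = 1 then
    (z.map (fun p => if p.1 == p.2 then p.1 else -1), true)
  else ([], false)

-- "".join(str(x) if x != -1 else "-" for x in term), kept as List Char (the PySem string side)
def pvFormatTermA (term : List Int) : List Char :=
  PySem.Chars.join [] (term.map (fun x => if x != -1 then PySem.Int.toChars x else ['-']))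

def pvLineA (a b g : List Int) : String :=
  String.ofList ([' ', ' '] ++ pvFormatTermA a ++ " + ".toList ++ pvFormatTermA b
    ++ " -> ".toList ++ pvFormatTermA g)

def pvStageHdrA (stage : Int) : String :=
  String.ofList ("Стадия ".toList ++ PySem.Int.toChars stage ++ [':'])

-- body of one while-iteration: for i in range(n): for j in range(i+1, n): …
def pvAStage (termList : List (List Int)) (stage : Int) :
    PySem.Set (List Int) × PySem.Set (List Int) × List String :=
  let n : Int := PySem.List.len termList
  (PySem.List.pyRange 0 n 1).foldl (fun st i =>
    (PySem.List.pyRange (i + 1) n 1).foldl (fun st j =>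
      let ti := PySem.List.pyGetD termList i []
      let tj := PySem.List.pyGetD termList j []
      let r := pvDiffByOne ti tj
      if r.2 then
        (PySem.Set.add st.1 r.1, PySem.Set.add (PySem.Set.add st.2.1 ti) tj,
         st.2.2 ++ [pvLineA ti tj r.1])
      else st) st)
    (((PySem.Set.empty : PySem.Set (List Int)), (PySem.Set.empty : PySem.Set (List Int)),
      [pvStageHdrA stage]))

def pvALoop : Nat → List String → PySem.Set (List Int) → PySem.Set (List Int) → Int →
    List (List Int) × List String
  | 0, log, _, primes, _ => (pvSortT primes, log)  -- fuel exhausted (never reached: fuel > stage count)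
  | fuel + 1, log, current, primes, stage =>
    if current = [] then (pvSortT primes, log)
    else
      let termList := pvSortT current
      let st := pvAStage termList stage
      let next := st.1
      let used := st.2.1
      let stageLog := st.2.2
      let unmerged := PySem.Set.diff current used
      let primes' := PySem.Set.update primes unmerged
      if next = [] then
        if stage = 1 then (pvSortT primes', log ++ ["  Склеивание невозможно."])
        else (pvSortT primes', log ++ stageLog ++ ["  Процесс склеивания завершен."])
      else
        pvALoop fuel (log ++ stageLog ++ [""]) next primes' (stage + 1)

def get_prime_implicants_with_steps (terms : List (List Int)) : List (List Int) × List String :=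
  pvALoop (pvFuelA terms) [] (PySem.Set.ofList terms) (PySem.Set.empty) 1

-- ===== PORT B =====

def pvGluePairs : List (Int × Int) → Option (List Int)
  | [] => none
  | (x, y) :: rest =>
    if x = y then (pvGluePairs rest).map (fun g => x :: g)
    else if rest.all (fun p => p.1 == p.2) then some (-1 :: rest.map (fun p => p.1))
    else none

def pvGlueB (a b : List Int) : Option (List Int) := pvGluePairs (a.zip b)

-- "".join("-" if x == -1 else str(x) for x in t), kept as List Char (the PySem string side)
def pvFmtB (t : List Int) : List Char :=
  PySem.Chars.join [] (t.map (fun x => if x == -1 then ['-'] else PySem.Int.toChars x))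

def pvLineB (a b g : List Int) : String :=
  String.ofList ([' ', ' '] ++ pvFmtB a ++ " + ".toList ++ pvFmtB b ++ " -> ".toList ++ pvFmtB g)

def pvHdrB (stage : Int) : String :=
  String.ofList ("Стадия ".toList ++ PySem.Int.toChars stage ++ [':'])

-- the tails pair scan: while rest: a, rest = rest[0], rest[1:]; for b in rest: …
def pvMatches : List (List Int) → List (List Int × List Int × List Int)
  | [] => []
  | a :: rest =>
    (rest.filterMap (fun b => (pvGlueB a b).map (fun g => (a, b, g)))) ++ pvMatches rest

def pvFuelB (terms : List (List Int)) : Nat :=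
  let L := (terms.map List.length).foldl max 0
  (L + 1) * (L + 1) + 2

def pvBLoop : Nat → List String → List (List Int) → PySem.Set (List Int) → Int →
    List (List Int) × List String
  | 0, log, _, primes, _ => (pvSortT primes, log)  -- fuel exhausted (never reached: fuel > stage count)
  | fuel + 1, log, current, primes, stage =>
    if current = [] then (pvSortT primes, log)
    else
      let ms := pvMatches current
      let used := PySem.Set.ofList (ms.flatMap (fun m => [m.1, m.2.1]))
      let primes' := PySem.Set.update primes
        (current.filter (fun t => !(PySem.Set.contains used t)))
      let lines := ms.map (fun m => pvLineB m.1 m.2.1 m.2.2)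
      if ms = [] then
        if stage = 1 then (pvSortT primes', log ++ ["  Склеивание невозможно."])
        else (pvSortT primes', log ++ [pvHdrB stage] ++ lines ++ ["  Процесс склеивания завершен."])
      else
        pvBLoop fuel (log ++ [pvHdrB stage] ++ lines ++ [""])
          (pvSortT (PySem.Set.ofList (ms.map (fun m => m.2.2)))) primes' (stage + 1)

def get_prime_implicants_with_steps_alt (terms : List (List Int)) : List (List Int) × List String :=
  pvBLoop (pvFuelB terms) [] (pvSortT (PySem.Set.ofList terms)) (PySem.Set.empty) 1

-- ===== PRECONDITION & SPEC =====
def Spec_get_prime_implicants_with_steps (terms : List (List Int)) (out : List (List Int) × List String) : Prop := out = get_prime_implicants_with_steps_alt terms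
instance (terms : List (List Int)) (out : List (List Int) × List String) : Decidable (Spec_get_prime_implicants_with_steps terms out) := by unfold Spec_get_prime_implicants_with_steps; infer_instance

-- ===== CLAIM (what is proved, stated in full; the proofs are below) =====
def Claim_equal_get_prime_implicants_with_steps : Prop := ∀ (terms : List (List Int)), Dom_get_prime_implicants_with_steps terms → Spec_get_prime_implicants_with_steps terms (get_prime_implicants_with_steps terms)

-- ===== LEMMAS AND PROOFS =====

-- the nested index loops, reshaped: fold over the tails of the term list
def pvTailsFold {σ : Type} (step : σ → List Int → List Int → σ) :
    List (List Int) → σ → σ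
  | [], s => s
  | a :: rest, s => pvTailsFold step rest (rest.foldl (fun s b => step s a b) s)

theorem pvGluePairs_eq (z : List (Int × Int)) :
    pvGluePairs z = if z.countP (fun p => p.1 != p.2) = 1
      then some (z.map (fun p => if p.1 == p.2 then p.1 else -1)) else none := by
  induction z with
  | nil => simp [pvGluePairs]
  | cons hd tl ih =>
    obtain ⟨x, y⟩ := hd
    by_cases h : x = y
    · simp only [pvGluePairs, h, ih, List.countP_cons, List.map_cons]
      by_cases h1 : tl.countP (fun p => p.1 != p.2) = 1 <;> simp [h1]
    · have hcnt : (((x, y) :: tl).countP (fun p => p.1 != p.2)) = tl.countP (fun p => p.1 != p.2) + 1 := by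
        simp [h]
      by_cases h0 : tl.countP (fun p => p.1 != p.2) = 0
      · have hall : tl.all (fun p => p.1 == p.2) = true := by
          rw [List.all_eq_true]
          intro p hp
          have := List.countP_eq_zero.mp h0 p hp
          simpa using this
        simp [pvGluePairs, h, hall, hcnt, h0]
        intro a' b' hmem hne
        have := List.countP_eq_zero.mp h0 _ hmem
        simp at this
        exact absurd this hne
      · have hall : (tl.all fun p => p.1 == p.2) = false := by
          apply Bool.eq_false_iff.mpr
          intro hc
          apply h0
          apply List.countP_eq_zero.mpr
          intro p hp
          have := List.all_eq_true.mp hc p hp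
          simpa using this
        simp [pvGluePairs, h, hall, hcnt, h0]

theorem pvDiffByOne_eq (a b : List Int) :
    pvDiffByOne a b = match pvGlueB a b with
      | some g => (g, true)
      | none => ([], false) := by
  rw [pvGlueB, pvGluePairs_eq]
  by_cases h : (a.zip b).countP (fun p => p.1 != p.2) = 1 <;>
    simp [pvDiffByOne, h]

theorem pvFmt_eq (t : List Int) : pvFormatTermA t = pvFmtB t := by
  unfold pvFormatTermA pvFmtB
  congr 1
  apply List.map_congr_left
  intro x _
  by_cases h : x = -1 <;> simp [h]

theorem pvLine_eq (a b g : List Int) : pvLineA a b g = pvLineB a b g := by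
  simp [pvLineA, pvLineB, pvFmt_eq]

theorem pvNested_aux {σ : Type} (step : σ → List Int → List Int → σ) (L : List (List Int)) :
    ∀ (d k : Nat), k ≤ L.length → d = L.length - k → ∀ s : σ,
    (PySem.List.pyRange (k : Int) (PySem.List.len L) 1).foldl (fun st i =>
      (PySem.List.pyRange (i + 1) (PySem.List.len L) 1).foldl (fun st j =>
        step st (PySem.List.pyGetD L i []) (PySem.List.pyGetD L j [])) st) s
    = pvTailsFold step (L.drop k) s := by
  intro d
  induction d with
  | zero =>
    intro k hk hd s
    have hkl : k = L.length := by omega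
    rw [PySem.List.pyRange_one_eq_nil (by simp [hkl])]
    rw [hkl, List.drop_length]
    rfl
  | succ d ih =>
    intro k hk hd s
    have hklt : k < L.length := by omega
    rw [PySem.List.pyRange_one_cons (by simp; exact_mod_cast hklt)]
    simp only [List.foldl_cons]
    have hinner : ∀ s' : σ,
        (PySem.List.pyRange ((k : Int) + 1) (PySem.List.len L) 1).foldl (fun st j =>
          step st (PySem.List.pyGetD L (k : Int) []) (PySem.List.pyGetD L j [])) s'
        = (L.drop (k + 1)).foldl (fun st b => step st (L[k]'hklt) b) s' := by
      intro s'
      rw [PySem.List.foldl_pyRange_pyGetD L []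
        (fun st b => step st (PySem.List.pyGetD L (k : Int) []) b) s'
        (a := (k : Int) + 1) (by positivity)]
      have h1 : ((k : Int) + 1).toNat = k + 1 := by omega
      have h2 : PySem.List.pyGetD L (k : Int) [] = L[k]'hklt := by
        rw [PySem.List.pyGetD_natCast, List.getD_eq_getElem?_getD, List.getElem?_eq_getElem hklt]
        rfl
      rw [h1, h2]
    rw [hinner]
    have hcast : (k : Int) + 1 = ((k + 1 : Nat) : Int) := by push_cast; ring
    rw [hcast, ih (k + 1) (by omega) (by omega)]
    rw [List.drop_eq_getElem_cons hklt]
    rfl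

theorem pvAStage_eq_tails {σ : Type} (step : σ → List Int → List Int → σ)
    (L : List (List Int)) (s : σ) :
    (PySem.List.pyRange 0 (PySem.List.len L) 1).foldl (fun st i =>
      (PySem.List.pyRange (i + 1) (PySem.List.len L) 1).foldl (fun st j =>
        step st (PySem.List.pyGetD L i []) (PySem.List.pyGetD L j [])) st) s
    = pvTailsFold step L s := by
  have := pvNested_aux step L L.length 0 (by omega) (by omega) s
  simpa using this

def pvStepA (st : PySem.Set (List Int) × PySem.Set (List Int) × List String)
    (a b : List Int) : PySem.Set (List Int) × PySem.Set (List Int) × List String :=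
  let r := pvDiffByOne a b
  if r.2 then
    (PySem.Set.add st.1 r.1, PySem.Set.add (PySem.Set.add st.2.1 a) b,
     st.2.2 ++ [pvLineA a b r.1])
  else st

def pvRowOf (a : List Int) (rest : List (List Int)) : List (List Int × List Int × List Int) :=
  rest.filterMap (fun b => (pvGlueB a b).map (fun g => (a, b, g)))

theorem pvRow_char (a : List Int) : ∀ (rest : List (List Int))
    (st : PySem.Set (List Int) × PySem.Set (List Int) × List String),
    rest.foldl (fun st b => pvStepA st a b) st =
      (PySem.Set.update st.1 ((pvRowOf a rest).map (fun m => m.2.2)),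
       PySem.Set.update st.2.1 ((pvRowOf a rest).flatMap (fun m => [m.1, m.2.1])),
       st.2.2 ++ (pvRowOf a rest).map (fun m => pvLineA m.1 m.2.1 m.2.2)) := by
  intro rest
  induction rest with
  | nil => intro st; simp [pvRowOf, PySem.Set.update_nil]
  | cons b rest ih =>
    intro st
    obtain ⟨s1, s2, s3⟩ := st
    cases hg : pvGlueB a b with
    | none =>
      have hstep : pvStepA (s1, s2, s3) a b = (s1, s2, s3) := by
        simp [pvStepA, pvDiffByOne_eq, hg]
      simp only [List.foldl_cons, hstep, ih]
      simp [pvRowOf, hg]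
    | some g =>
      have hstep : pvStepA (s1, s2, s3) a b =
          (PySem.Set.add s1 g, PySem.Set.add (PySem.Set.add s2 a) b,
           s3 ++ [pvLineA a b g]) := by
        simp [pvStepA, pvDiffByOne_eq, hg]
      simp only [List.foldl_cons, hstep, ih]
      simp only [pvRowOf, List.filterMap_cons, hg, Option.map_some, List.map_cons,
        List.flatMap_cons, PySem.Set.update_cons, List.cons_append, List.nil_append,
        List.append_assoc]

theorem pvTails_char : ∀ (L : List (List Int))
    (st : PySem.Set (List Int) × PySem.Set (List Int) × List String),
    pvTailsFold pvStepA L st =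
      (PySem.Set.update st.1 ((pvMatches L).map (fun m => m.2.2)),
       PySem.Set.update st.2.1 ((pvMatches L).flatMap (fun m => [m.1, m.2.1])),
       st.2.2 ++ (pvMatches L).map (fun m => pvLineA m.1 m.2.1 m.2.2)) := by
  intro L
  induction L with
  | nil => intro st; simp [pvTailsFold, pvMatches, PySem.Set.update_nil]
  | cons a rest ih =>
    intro st
    show pvTailsFold pvStepA rest (rest.foldl (fun st b => pvStepA st a b) st) = _
    rw [pvRow_char, ih]
    simp only [pvMatches, List.map_append, List.flatMap_append, PySem.Set.update_append,
      List.append_assoc]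
    rfl

theorem pvAStage_char (L : List (List Int)) (stage : Int) :
    pvAStage L stage =
      (PySem.Set.ofList ((pvMatches L).map (fun m => m.2.2)),
       PySem.Set.ofList ((pvMatches L).flatMap (fun m => [m.1, m.2.1])),
       [pvStageHdrA stage] ++ (pvMatches L).map (fun m => pvLineB m.1 m.2.1 m.2.2)) := by
  have h1 : pvAStage L stage = pvTailsFold pvStepA L
      ((PySem.Set.empty : PySem.Set (List Int)), (PySem.Set.empty : PySem.Set (List Int)),
       [pvStageHdrA stage]) := by
    rw [← pvAStage_eq_tails pvStepA L]
    rfl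
  rw [h1, pvTails_char]
  simp only [PySem.Set.update_empty, pvLine_eq]

theorem pvSortT_eq_of (pA pB : PySem.Set (List Int)) (hA : pA.Nodup) (hB : pB.Nodup)
    (hmem : ∀ x, x ∈ pA ↔ x ∈ pB) : pvSortT pA = pvSortT pB := by
  unfold pvSortT
  exact @PySem.List.sorted_eq_sorted_of_perm (List Int) (List Int) List.instLinearOrder pA pB
    (fun x => x) (fun _ _ h => h) ((List.perm_ext_iff_of_nodup hA hB).mpr hmem)

theorem pvHdr_eq (s : Int) : pvStageHdrA s = pvHdrB s := rfl

theorem pvOfList_eq_nil_iff (xs : List (List Int)) : PySem.Set.ofList xs = [] ↔ xs = [] := by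
  cases xs with
  | nil => simp
  | cons a t => simp [PySem.Set.ofList_cons]

theorem pvSortT_nil : pvSortT [] = [] := rfl

theorem pvSortT_eq_nil_iff (xs : List (List Int)) : pvSortT xs = [] ↔ xs = [] := by
  unfold pvSortT
  exact @PySem.List.sorted_eq_nil_iff (List Int) (List Int) List.instLinearOrder.toLT
    LinearOrder.toDecidableLT xs (fun x => x) false

theorem pvMem_sortT (x : List Int) (xs : List (List Int)) : x ∈ pvSortT xs ↔ x ∈ xs := by
  unfold pvSortT
  exact @PySem.List.mem_sorted (List Int) (List Int) List.instLinearOrder.toLT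
    LinearOrder.toDecidableLT xs (fun x => x) false x

theorem pvLoop_eq (fuel : Nat) : ∀ (log : List String) (curA : PySem.Set (List Int))
    (primesA primesB : PySem.Set (List Int)) (stage : Int),
    primesA.Nodup → primesB.Nodup → (∀ x, x ∈ primesA ↔ x ∈ primesB) → curA.Nodup →
    pvALoop fuel log curA primesA stage = pvBLoop fuel log (pvSortT curA) primesB stage := by
  induction fuel with
  | zero =>
    intro log curA pA pB stage hA hB hmem hcur
    simp only [pvALoop, pvBLoop]
    rw [pvSortT_eq_of pA pB hA hB hmem]
  | succ fuel ih =>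
    intro log curA pA pB stage hA hB hmem hcur
    by_cases hc : curA = []
    · subst hc
      simp only [pvALoop, pvBLoop, pvSortT_nil, if_true]
      rw [pvSortT_eq_of pA pB hA hB hmem]
    · have hcB : pvSortT curA ≠ [] := fun h => hc ((pvSortT_eq_nil_iff curA).mp h)
      simp only [pvALoop, pvBLoop, if_neg hc, if_neg hcB]
      rw [pvAStage_char]
      set L := pvSortT curA with hL
      set M := pvMatches L with hM
      set used : PySem.Set (List Int) := PySem.Set.ofList (M.flatMap (fun m => [m.1, m.2.1]))
        with hused
      -- the two primes accumulators keep the same membership and stay Nodup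
      have hA' : (PySem.Set.update pA (PySem.Set.diff curA used)).Nodup :=
        PySem.Set.nodup_update _ _ hA
      have hB' : (PySem.Set.update pB (L.filter (fun t => !(PySem.Set.contains used t)))).Nodup :=
        PySem.Set.nodup_update _ _ hB
      have hmem' : ∀ x, x ∈ PySem.Set.update pA (PySem.Set.diff curA used) ↔
          x ∈ PySem.Set.update pB (L.filter (fun t => !(PySem.Set.contains used t))) := by
        intro x
        rw [PySem.Set.mem_update, PySem.Set.mem_update, PySem.Set.mem_diff, List.mem_filter]
        have h1 : x ∈ L ↔ x ∈ curA := pvMem_sortT x curA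
        have h2 : (!(PySem.Set.contains used x)) = true ↔ x ∉ used := by
          simp
        rw [h1, h2, hmem x]
      -- A's next set is empty iff B's match list is empty
      have hsort : pvSortT (PySem.Set.update pA (PySem.Set.diff curA used))
          = pvSortT (PySem.Set.update pB (L.filter (fun t => !(PySem.Set.contains used t)))) :=
        pvSortT_eq_of _ _ hA' hB' hmem'
      by_cases hm : M = []
      · by_cases hs : stage = 1 <;> simp [hm, hs, hsort, pvHdr_eq]
      · have hnext : ¬ PySem.Set.ofList (M.map (fun m => m.2.2)) = [] := by
          rw [pvOfList_eq_nil_iff, List.map_eq_nil_iff]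
          exact hm
        simp only [if_neg hnext, if_neg hm]
        rw [ih _ _ _ _ _ (PySem.Set.nodup_update _ _ hA) (PySem.Set.nodup_update _ _ hB) hmem'
          (PySem.Set.nodup_ofList _)]
        simp [pvHdr_eq]

-- ===== VERDICT (by name: the statement is the Claim_ definition above) =====
theorem get_prime_implicants_with_steps_spec : Claim_equal_get_prime_implicants_with_steps := by
  intro terms _
  unfold Spec_get_prime_implicants_with_steps
  unfold get_prime_implicants_with_steps get_prime_implicants_with_steps_alt
  have hfuel : pvFuelB terms = pvFuelA terms := rfl
  rw [hfuel]
  exact pvLoop_eq (pvFuelA terms) [] (PySem.Set.ofList terms) PySem.Set.empty PySem.Set.empty 1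
    List.nodup_nil List.nodup_nil (fun _ => Iff.rfl) (PySem.Set.nodup_ofList terms)
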